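-- pv_equiv track=rewrite | github.com/parthjpatel99/Bctci-code-solutions | graphs/connectivity/reachability_queries.py | connected_component_queries
-- ===== SOURCE A (Python) =====
-- def connected_component_queries(graph, queries):
--     node_to_cc = {}
--
--     def dfs(node, cc_id):
--         if node in node_to_cc:
--             return
--         node_to_cc[node] = cc_id
--         for nbr in graph[node]:
--             dfs(nbr, cc_id)
--
--     cc_id = 0
--     for node in range(len(graph)):
--         if node not in node_to_cc:
--             dfs(node, cc_id)
--             cc_id += 1
--
--     res = []
--
--     for node1, node2 in queries:
--         res.append(node_to_cc[node1] == node_to_cc[node2])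
--
--     return res
-- ===== SOURCE B (Python) =====
-- def connected_component_queries(graph, queries):
--     cc = {}
--     cc_id = 0
--     for start in range(len(graph)):
--         if start in cc:
--             continue
--         frontier = {start}
--         while frontier:
--             for node in frontier:
--                 cc[node] = cc_id
--             frontier = {nbr for node in frontier for nbr in graph[node] if nbr not in cc}
--         cc_id += 1
--     return [cc[a] == cc[b] for a, b in queries]
-- ===== Notes on version B (the rewrite author's own statement) =====
-- stated objective: alternative
-- what changed: The recursive per-node DFS (nested def mutating an enclosing dict, one call per edge) is replaced by a frontier/level-set BFS: each component is flooded by repeatedly taking the set of unlabeled neighbours of the current frontier set, so no recursion and no per-node call stack; the query phase is a comprehension.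
import Mathlib
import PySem

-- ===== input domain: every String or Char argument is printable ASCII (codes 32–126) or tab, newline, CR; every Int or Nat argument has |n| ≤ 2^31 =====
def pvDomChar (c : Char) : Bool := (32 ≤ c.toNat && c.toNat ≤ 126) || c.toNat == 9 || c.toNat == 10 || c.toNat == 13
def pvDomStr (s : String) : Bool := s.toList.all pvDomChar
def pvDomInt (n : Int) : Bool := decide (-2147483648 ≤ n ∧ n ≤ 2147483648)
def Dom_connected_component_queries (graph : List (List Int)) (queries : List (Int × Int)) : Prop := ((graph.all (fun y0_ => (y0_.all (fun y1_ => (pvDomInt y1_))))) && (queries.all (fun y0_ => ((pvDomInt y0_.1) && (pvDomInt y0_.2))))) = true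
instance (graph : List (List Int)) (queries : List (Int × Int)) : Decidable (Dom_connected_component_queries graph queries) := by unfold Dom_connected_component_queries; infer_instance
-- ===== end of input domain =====

-- B replaces A's recursive callback DFS by a frontier/level-set BFS flood (sets of
-- unlabeled neighbours per round, no recursion); return values proved equal on Pre_.


-- ===== PORT A =====
-- Fuel-indexed transliteration of A's recursive `dfs` (fuel is only a totality device;
-- `2*len+1` is proved ample on Pre_ below).  Where Python would raise IndexError
-- (`graph[node]` out of range) `pyGet?` is `none` and the port stops — outside Pre_.
def pvDfsA (graph : List (List Int)) (cc : Int) : Nat → Int → PySem.Dict Int Int → PySem.Dict Int Int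
  | 0, _, d => d
  | fuel + 1, node, d =>
    if d.contains node then d
    else
      match PySem.List.pyGet? graph node with
      | none => d.insert node cc
      | some nbrs => nbrs.foldl (fun acc nb => pvDfsA graph cc fuel nb acc) (d.insert node cc)

def connected_component_queries (graph : List (List Int)) (queries : List (Int × Int)) : List Bool :=
  let st := (PySem.List.pyRange 0 graph.length 1).foldl
    (fun (st : PySem.Dict Int Int × Int) node =>
      if st.1.contains node then st
      else (pvDfsA graph st.2 (2 * graph.length + 1) node st.1, st.2 + 1))
    (PySem.Dict.empty, 0)
  -- node_to_cc[node1] == node_to_cc[node2]; a missing key is Python's KeyError, excluded by Pre_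
  queries.foldl (fun res q => res ++ [decide (st.1.getD q.1 0 = st.1.getD q.2 0)]) []

-- ===== PORT B =====
-- the set comprehension `{nbr for node in frontier for nbr in graph[node] if nbr not in cc}`
-- (Python raises IndexError where `pyGet?` is none — outside Pre_; `getD []` skips there)
def pvFrontier (graph : List (List Int)) (d : PySem.Dict Int Int) (fr : PySem.Set Int) : PySem.Set Int :=
  fr.foldl (fun (s : PySem.Set Int) node =>
      ((PySem.List.pyGet? graph node).getD []).foldl
        (fun (s : PySem.Set Int) nbr => if d.contains nbr then s else PySem.Set.add s nbr) s)
    PySem.Set.empty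

-- B's `while frontier:` flood loop: label the whole frontier, then take its unlabeled
-- neighbour set.  Fuel is only a totality device; `2*len+1` is proved ample on Pre_ below.
def pvLoopB (graph : List (List Int)) (cc : Int) : Nat → PySem.Set Int → PySem.Dict Int Int → PySem.Dict Int Int
  | 0, _, d => d
  | fuel + 1, fr, d =>
    if fr = [] then d
    else
      let d' := fr.foldl (fun (acc : PySem.Dict Int Int) node => acc.insert node cc) d
      pvLoopB graph cc fuel (pvFrontier graph d' fr) d'

def connected_component_queries_alt (graph : List (List Int)) (queries : List (Int × Int)) : List Bool :=
  let st := (PySem.List.pyRange 0 graph.length 1).foldl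
    (fun (st : PySem.Dict Int Int × Int) start =>
      if st.1.contains start then st
      else (pvLoopB graph st.2 (2 * graph.length + 1) [start] st.1, st.2 + 1))
    (PySem.Dict.empty, 0)
  queries.map (fun q => decide (st.1.getD q.1 0 = st.1.getD q.2 0))

-- ===== PRECONDITION & SPEC =====
-- Pre_ is exactly the domain on which A returns: every neighbour must be a valid (possibly
-- negative, Python-wraparound) index, i.e. lie in [-len, len) — otherwise dfs reaches it and
-- graph[v] raises IndexError — and every query endpoint must end up labelled, i.e. be a node
-- index in [0, len) or a negative value occurring as a neighbour — otherwise node_to_cc[...]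
-- raises KeyError.
def Pre_connected_component_queries (graph : List (List Int)) (queries : List (Int × Int)) : Prop :=
  (∀ l ∈ graph, ∀ v ∈ l, -(graph.length : Int) ≤ v ∧ v < (graph.length : Int)) ∧
  (∀ q ∈ queries,
    ((0 ≤ q.1 ∧ q.1 < (graph.length : Int)) ∨ (q.1 < 0 ∧ ∃ l ∈ graph, q.1 ∈ l)) ∧
    ((0 ≤ q.2 ∧ q.2 < (graph.length : Int)) ∨ (q.2 < 0 ∧ ∃ l ∈ graph, q.2 ∈ l)))
instance (graph : List (List Int)) (queries : List (Int × Int)) : Decidable (Pre_connected_component_queries graph queries) := by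
  unfold Pre_connected_component_queries; infer_instance

def pvWitness_connected_component_queries : List (List Int) × (List (Int × Int)) :=
  ([[1], [0], []], [(0, 1), (1, 2)])

def Spec_connected_component_queries (graph : List (List Int)) (queries : List (Int × Int)) (out : List Bool) : Prop := out = connected_component_queries_alt graph queries
instance (graph : List (List Int)) (queries : List (Int × Int)) (out : List Bool) : Decidable (Spec_connected_component_queries graph queries out) := by unfold Spec_connected_component_queries; infer_instance

-- ===== CLAIM (what is proved, stated in full; the proofs are below) =====
def Claim_equal_connected_component_queries : Prop := ∀ (graph : List (List Int)) (queries : List (Int × Int)), Dom_connected_component_queries graph queries → Pre_connected_component_queries graph queries → Spec_connected_component_queries graph queries (connected_component_queries graph queries)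

-- ===== LEMMAS AND PROOFS =====

-- proof-side abbreviations: valid (wraparound) node values, well-formed dicts, fuel measure,
-- the neighbour list, one-step reachability closure, and edge-closed key sets
def pvInR (n : Nat) (x : Int) : Prop := -(n : Int) ≤ x ∧ x < (n : Int)
def pvOK (n : Nat) (d : PySem.Dict Int Int) : Prop := d.keys.Nodup ∧ ∀ k ∈ d.keys, pvInR n k
def pvMu (n : Nat) (d : PySem.Dict Int Int) : Nat := 2 * n - d.keys.length
def pvAdj (graph : List (List Int)) (x : Int) : List Int := (PySem.List.pyGet? graph x).getD []
def pvReach (graph : List (List Int)) (x k : Int) : Prop :=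
  Relation.ReflTransGen (fun a b => b ∈ pvAdj graph a) x k
def pvClosedC (graph : List (List Int)) (d : PySem.Dict Int Int) : Prop :=
  ∀ k ∈ d.keys, ∀ nb ∈ pvAdj graph k, nb ∈ d.keys

theorem pv_pyGet?_some (γ : List (List Int)) (x : Int) (hx : pvInR γ.length x) :
    PySem.List.pyGet? γ x = some (pvAdj γ x) := by
  cases hg : PySem.List.pyGet? γ x with
  | none =>
    exfalso
    rw [PySem.List.pyGet?_eq_none_iff] at hg
    exact hg (by have h1 := hx.1; have h2 := hx.2; simp [PySem.Raise.InRange]; omega)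
  | some l => simp [pvAdj, hg]

theorem pv_card_le (n : Nat) (L : List Int) (hnd : L.Nodup) (hv : ∀ x ∈ L, pvInR n x) :
    L.length ≤ 2 * n := by
  have hsub : L.toFinset ⊆ Finset.Ico (-(n:Int)) n := by
    intro k hk; simp only [List.mem_toFinset] at hk
    simp only [Finset.mem_Ico]; exact hv k hk
  have := Finset.card_le_card hsub
  rw [List.toFinset_card_of_nodup hnd, Int.card_Ico] at this
  omega

theorem pv_len_lt (n : Nat) (d : PySem.Dict Int Int) (x : Int)
    (hd : pvOK n d) (hx : pvInR n x) (hmem : x ∉ d.keys) : d.keys.length < 2 * n := by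
  have h := pv_card_le n (x :: d.keys) (List.nodup_cons.mpr ⟨hmem, hd.1⟩)
    (by intro z hz; rcases List.mem_cons.mp hz with e | hz'
        · subst e; exact hx
        · exact hd.2 z hz')
  simp only [List.length_cons] at h
  omega

theorem pv_get?_mono (γ : List (List Int)) (cc : Int) (f : Nat) :
    ∀ (x : Int) (d : PySem.Dict Int Int) (k v : Int),
      d.get? k = some v → (pvDfsA γ cc f x d).get? k = some v := by
  induction f with
  | zero => intro x d k v h; simpa [pvDfsA] using h
  | succ f IH =>
    intro x d k v h
    by_cases hc : d.contains x = true
    · simpa [pvDfsA, hc] using h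
    · simp only [Bool.not_eq_true] at hc
      have hkx : k ≠ x := by
        intro e; subst e
        rw [PySem.Dict.contains_eq_isSome_get?, h] at hc; simp at hc
      have hins : (d.insert x cc).get? k = some v := by
        rw [PySem.Dict.get?_insert_of_ne d cc hkx]; exact h
      cases hg : PySem.List.pyGet? γ x with
      | none => simpa [pvDfsA, hc, hg] using hins
      | some nbrs =>
        simp only [pvDfsA, hc, hg, Bool.false_eq_true, if_false]
        exact List.foldlRecOn (motive := fun (acc : PySem.Dict Int Int) => acc.get? k = some v) nbrs _ hins
          (fun b hb a _ => IH a b k v hb)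

theorem pv_contains_mono (γ : List (List Int)) (cc : Int) (f : Nat) (x : Int)
    (d : PySem.Dict Int Int) (k : Int) (h : d.contains k = true) :
    (pvDfsA γ cc f x d).contains k = true := by
  rw [PySem.Dict.contains_eq_isSome_get?] at h
  obtain ⟨v, hv⟩ := Option.isSome_iff_exists.mp h
  rw [PySem.Dict.contains_eq_isSome_get?, pv_get?_mono γ cc f x d k v hv]
  rfl

theorem pv_keys_sub (γ : List (List Int)) (cc : Int) (f : Nat) (x : Int) (d : PySem.Dict Int Int) :
    d.keys ⊆ (pvDfsA γ cc f x d).keys := by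
  intro k hk
  exact (PySem.Dict.contains_iff_mem_keys _ k).mp
    (pv_contains_mono γ cc f x d k ((PySem.Dict.contains_iff_mem_keys d k).mpr hk))

theorem pv_ok_insert (n : Nat) (d : PySem.Dict Int Int) (x cc : Int)
    (hd : pvOK n d) (hx : pvInR n x) : pvOK n (d.insert x cc) := by
  obtain ⟨hnd, hk⟩ := hd
  refine ⟨PySem.Dict.nodup_keys_insert d x cc hnd, ?_⟩
  intro k hkm
  rcases (PySem.Dict.mem_keys_insert d x k cc).mp hkm with e | hkm'
  · subst e; exact hx
  · exact hk k hkm'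

theorem pv_ok_pres (γ : List (List Int)) (cc : Int)
    (HP : ∀ l ∈ γ, ∀ v ∈ l, pvInR γ.length v) (f : Nat) :
    ∀ (x : Int) (d : PySem.Dict Int Int), pvOK γ.length d → pvInR γ.length x →
      pvOK γ.length (pvDfsA γ cc f x d) := by
  induction f with
  | zero => intro x d hd _; simpa [pvDfsA] using hd
  | succ f IH =>
    intro x d hd hx
    by_cases hc : d.contains x = true
    · simpa [pvDfsA, hc] using hd
    · simp only [Bool.not_eq_true] at hc
      have hins := pv_ok_insert γ.length d x cc hd hx
      cases hg : PySem.List.pyGet? γ x with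
      | none => simpa [pvDfsA, hc, hg] using hins
      | some nbrs =>
        simp only [pvDfsA, hc, hg, Bool.false_eq_true, if_false]
        have hnb : ∀ v ∈ nbrs, pvInR γ.length v :=
          HP nbrs (PySem.List.mem_of_pyGet?_eq_some γ hg)
        exact List.foldlRecOn (motive := fun (acc : PySem.Dict Int Int) => pvOK γ.length acc) nbrs _ hins
          (fun b hb a ha => IH a b hb (hnb a ha))

theorem pv_mu_le (γ : List (List Int)) (cc : Int) (f : Nat) (x : Int) (d : PySem.Dict Int Int)
    (hd : d.keys.Nodup) : pvMu γ.length (pvDfsA γ cc f x d) ≤ pvMu γ.length d := by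
  have hlen : d.keys.length ≤ (pvDfsA γ cc f x d).keys.length :=
    (hd.subperm (pv_keys_sub γ cc f x d)).length_le
  unfold pvMu; omega

-- every value written by A's dfs is cc
theorem pv_values (γ : List (List Int)) (cc : Int) (f : Nat) :
    ∀ (x : Int) (d : PySem.Dict Int Int) (k : Int),
      (pvDfsA γ cc f x d).get? k = d.get? k ∨ (pvDfsA γ cc f x d).get? k = some cc := by
  induction f with
  | zero => intro x d k; left; simp [pvDfsA]
  | succ f IH =>
    intro x d k
    by_cases hc : d.contains x = true
    · left; simp [pvDfsA, hc]
    · simp only [Bool.not_eq_true] at hc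
      have hbase : (d.insert x cc).get? k = d.get? k ∨ (d.insert x cc).get? k = some cc := by
        by_cases he : k = x
        · subst he; right; exact PySem.Dict.get?_insert_self d k cc
        · left; exact PySem.Dict.get?_insert_of_ne d cc he
      cases hg : PySem.List.pyGet? γ x with
      | none => simpa [pvDfsA, hc, hg] using hbase
      | some nbrs =>
        simp only [pvDfsA, hc, hg, Bool.false_eq_true, if_false]
        refine List.foldlRecOn
          (motive := fun (acc : PySem.Dict Int Int) => acc.get? k = d.get? k ∨ acc.get? k = some cc) nbrs _ hbase ?_
        intro b hb a _
        rcases IH a b k with h | h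
        · rw [h]; exact hb
        · right; exact h

-- every key A's dfs touches is reachable from its argument
theorem pv_sound (γ : List (List Int)) (cc : Int) (f : Nat) :
    ∀ (x : Int) (d : PySem.Dict Int Int) (k : Int),
      (pvDfsA γ cc f x d).get? k ≠ d.get? k → pvReach γ x k := by
  induction f with
  | zero => intro x d k h; exact absurd (by simp [pvDfsA]) h
  | succ f IH =>
    intro x d k h
    by_cases hc : d.contains x = true
    · exact absurd (by simp [pvDfsA, hc]) h
    · simp only [Bool.not_eq_true] at hc
      have hbase : ∀ (e : PySem.Dict Int Int), e = d.insert x cc →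
          e.get? k ≠ d.get? k → pvReach γ x k := by
        intro e he hne
        by_cases hkx : k = x
        · subst hkx; exact Relation.ReflTransGen.refl
        · exact absurd (he ▸ PySem.Dict.get?_insert_of_ne d cc hkx) hne
      cases hg : PySem.List.pyGet? γ x with
      | none =>
        simp only [pvDfsA, hc, hg, Bool.false_eq_true, if_false] at h
        exact hbase _ rfl h
      | some nbrs =>
        simp only [pvDfsA, hc, hg, Bool.false_eq_true, if_false] at h
        refine (List.foldlRecOn
          (motive := fun (acc : PySem.Dict Int Int) => acc.get? k ≠ d.get? k → pvReach γ x k)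
          nbrs _ (hbase _ rfl) ?_) h
        intro b hb a ha hne
        by_cases he : (pvDfsA γ cc f a b).get? k = b.get? k
        · exact hb (he ▸ hne)
        · have hak : pvReach γ a k := IH a b k he
          have hxa : pvReach γ x a :=
            Relation.ReflTransGen.single (by simp [pvAdj, hg]; exact ha)
          exact hxa.trans hak

theorem pv_x_in (γ : List (List Int)) (cc : Int) (f : Nat) (x : Int) (d : PySem.Dict Int Int)
    (hf : 0 < f) : (pvDfsA γ cc f x d).contains x = true := by
  cases f with
  | zero => omega
  | succ f =>
    by_cases hc : d.contains x = true
    · simp [pvDfsA, hc]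
    · simp only [Bool.not_eq_true] at hc
      cases hg : PySem.List.pyGet? γ x with
      | none => simp [pvDfsA, hc, hg, PySem.Dict.contains_insert_self]
      | some nbrs =>
        simp only [pvDfsA, hc, hg, Bool.false_eq_true, if_false]
        exact List.foldlRecOn (motive := fun (acc : PySem.Dict Int Int) => acc.contains x = true) nbrs _
          (PySem.Dict.contains_insert_self d x cc)
          (fun b hb a _ => pv_contains_mono γ cc f a b x hb)

-- the fold over a node's neighbour list keeps all proved properties and visits every element
theorem pv_fold_closed (γ : List (List Int)) (cc : Int) (f : Nat)
    (HP : ∀ l ∈ γ, ∀ v ∈ l, pvInR γ.length v)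
    (IH : ∀ (x : Int) (d : PySem.Dict Int Int), pvOK γ.length d → pvInR γ.length x →
      pvMu γ.length d < f →
      ∀ k, (pvDfsA γ cc f x d).contains k = true → d.contains k = false →
        ∀ nb ∈ pvAdj γ k, (pvDfsA γ cc f x d).contains nb = true)
    (P0 : Int → Prop) :
    ∀ (lst : List Int) (acc : PySem.Dict Int Int), pvOK γ.length acc → pvMu γ.length acc < f →
      (∀ z ∈ lst, pvInR γ.length z) →
      (∀ k, acc.contains k = true → P0 k → ∀ nb ∈ pvAdj γ k, acc.contains nb = true) →
      (pvOK γ.length (lst.foldl (fun a z => pvDfsA γ cc f z a) acc) ∧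
        pvMu γ.length (lst.foldl (fun a z => pvDfsA γ cc f z a) acc) ≤ pvMu γ.length acc) ∧
      (∀ k, acc.contains k = true →
        (lst.foldl (fun a z => pvDfsA γ cc f z a) acc).contains k = true) ∧
      (∀ z ∈ lst, (lst.foldl (fun a z => pvDfsA γ cc f z a) acc).contains z = true) ∧
      (∀ k, (lst.foldl (fun a z => pvDfsA γ cc f z a) acc).contains k = true → P0 k →
        ∀ nb ∈ pvAdj γ k, (lst.foldl (fun a z => pvDfsA γ cc f z a) acc).contains nb = true) := by
  intro lst
  induction lst with
  | nil =>
    intro acc hOK hmu _ hC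
    exact ⟨⟨hOK, le_refl _⟩, fun k hk => hk, by simp, hC⟩
  | cons z lst IHl =>
    intro acc hOK hmu hv hC
    have hz := hv z (by simp)
    have hOK' : pvOK γ.length (pvDfsA γ cc f z acc) := pv_ok_pres γ cc HP f z acc hOK hz
    have hmu' : pvMu γ.length (pvDfsA γ cc f z acc) ≤ pvMu γ.length acc :=
      pv_mu_le γ cc f z acc hOK.1
    have hC' : ∀ k, (pvDfsA γ cc f z acc).contains k = true → P0 k →
        ∀ nb ∈ pvAdj γ k, (pvDfsA γ cc f z acc).contains nb = true := by
      intro k hk hP nb hnb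
      by_cases hak : acc.contains k = true
      · exact pv_contains_mono γ cc f z acc nb (hC k hak hP nb hnb)
      · simp only [Bool.not_eq_true] at hak
        exact IH z acc hOK hz hmu k hk hak nb hnb
    have hres := IHl (pvDfsA γ cc f z acc) hOK' (lt_of_le_of_lt hmu' hmu)
      (fun y hy => hv y (by simp [hy])) hC'
    simp only [List.foldl_cons]
    refine ⟨⟨hres.1.1, le_trans hres.1.2 hmu'⟩, ?_, ?_, hres.2.2.2⟩
    · intro k hk
      exact hres.2.1 k (pv_contains_mono γ cc f z acc k hk)
    · intro y hy
      rcases List.mem_cons.mp hy with e | hy'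
      · subst e
        exact hres.2.1 y (pv_x_in γ cc f y acc (by omega))
      · exact hres.2.2.1 y hy'

-- every key newly written by A's dfs has all its neighbours written too
theorem pv_newclosed (γ : List (List Int)) (cc : Int)
    (HP : ∀ l ∈ γ, ∀ v ∈ l, pvInR γ.length v) :
    ∀ (f : Nat) (x : Int) (d : PySem.Dict Int Int), pvOK γ.length d → pvInR γ.length x →
      pvMu γ.length d < f →
      ∀ k, (pvDfsA γ cc f x d).contains k = true → d.contains k = false →
        ∀ nb ∈ pvAdj γ k, (pvDfsA γ cc f x d).contains nb = true := by
  intro f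
  induction f with
  | zero => intro x d _ _ hmu; omega
  | succ f IH =>
    intro x d hOK hx hmu k hk hk0 nb hnb
    by_cases hc : d.contains x = true
    · simp only [pvDfsA, hc, if_true] at hk
      rw [hk] at hk0; cases hk0
    · simp only [Bool.not_eq_true] at hc
      have hxmem : x ∉ d.keys := fun m => by
        rw [(PySem.Dict.contains_iff_mem_keys d x).mpr m] at hc; simp at hc
      have hlen := pv_len_lt γ.length d x hOK hx hxmem
      have hkeys := PySem.Dict.keys_insert_of_not_contains d (cc) hc
      have hlen' : (d.insert x cc).keys.length = d.keys.length + 1 := by rw [hkeys]; simp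
      have hins := pv_ok_insert γ.length d x cc hOK hx
      have hmu1 : pvMu γ.length (d.insert x cc) < f := by unfold pvMu at *; omega
      cases hg : PySem.List.pyGet? γ x with
      | none =>
        simp only [pvDfsA, hc, hg, Bool.false_eq_true, if_false] at hk
        rw [PySem.Dict.contains_insert] at hk
        have hkx : k = x := by
          rcases Bool.or_eq_true_iff.mp hk with h | h
          · exact eq_of_beq h
          · rw [h] at hk0; cases hk0
        subst hkx
        simp [pvAdj, hg] at hnb
      | some nbrs =>
        simp only [pvDfsA, hc, hg, Bool.false_eq_true, if_false] at hk ⊢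
        have hnbv : ∀ v ∈ nbrs, pvInR γ.length v :=
          HP nbrs (PySem.List.mem_of_pyGet?_eq_some γ hg)
        have hfold := pv_fold_closed γ cc f HP IH
          (fun j => (d.insert x cc).contains j = false) nbrs (d.insert x cc) hins hmu1 hnbv
          (by intro j hj hPj; rw [hj] at hPj; cases hPj)
        by_cases hkx : k = x
        · subst hkx
          have : nb ∈ nbrs := by simpa [pvAdj, hg] using hnb
          exact hfold.2.2.1 nb this
        · have hP : (d.insert x cc).contains k = false := by
            rw [PySem.Dict.contains_insert]
            simp [hk0, hkx]
          exact hfold.2.2.2 k hk hP nb hnb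

-- with an edge-closed starting dict, everything reachable from x gets written
theorem pv_complete (γ : List (List Int)) (cc : Int)
    (HP : ∀ l ∈ γ, ∀ v ∈ l, pvInR γ.length v) (x : Int) (d : PySem.Dict Int Int)
    (hOK : pvOK γ.length d) (hclosed : pvClosedC γ d) (hx : pvInR γ.length x) :
    ∀ k, pvReach γ x k → (pvDfsA γ cc (2 * γ.length + 1) x d).contains k = true := by
  intro k hr
  induction hr with
  | refl => exact pv_x_in γ cc (2 * γ.length + 1) x d (by omega)
  | tail hbc hstep IHb =>
    rename_i b c
    by_cases hb : d.contains b = true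
    · have hbk := (PySem.Dict.contains_iff_mem_keys d b).mp hb
      have hck := hclosed b hbk c hstep
      exact pv_contains_mono γ cc _ x d c ((PySem.Dict.contains_iff_mem_keys d c).mpr hck)
    · simp only [Bool.not_eq_true] at hb
      exact pv_newclosed γ cc HP (2 * γ.length + 1) x d hOK hx
        (by unfold pvMu; omega) b IHb hb c hstep

-- characterisation of one dfs call from an edge-closed dict
theorem pv_charA (γ : List (List Int)) (cc : Int)
    (HP : ∀ l ∈ γ, ∀ v ∈ l, pvInR γ.length v) (x : Int) (d : PySem.Dict Int Int)
    (hOK : pvOK γ.length d) (hclosed : pvClosedC γ d) (hx : pvInR γ.length x) (k : Int) :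
    (k ∈ d.keys → (pvDfsA γ cc (2 * γ.length + 1) x d).get? k = d.get? k) ∧
    (k ∉ d.keys → pvReach γ x k → (pvDfsA γ cc (2 * γ.length + 1) x d).get? k = some cc) ∧
    (k ∉ d.keys → ¬ pvReach γ x k → (pvDfsA γ cc (2 * γ.length + 1) x d).get? k = none) := by
  refine ⟨?_, ?_, ?_⟩
  · intro hk
    have hne : d.get? k ≠ none := fun h => (PySem.Dict.get?_eq_none_iff_not_mem_keys d k).mp h hk
    obtain ⟨v, hv⟩ := Option.ne_none_iff_exists'.mp hne
    rw [hv, pv_get?_mono γ cc _ x d k v hv]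
  · intro hk hr
    have hnone : d.get? k = none := (PySem.Dict.get?_eq_none_iff_not_mem_keys d k).mpr hk
    have hcont := pv_complete γ cc HP x d hOK hclosed hx k hr
    rw [PySem.Dict.contains_eq_isSome_get?] at hcont
    rcases pv_values γ cc (2 * γ.length + 1) x d k with h | h
    · rw [h, hnone] at hcont; cases hcont
    · exact h
  · intro hk hr
    by_contra hne
    have hnone : d.get? k = none := (PySem.Dict.get?_eq_none_iff_not_mem_keys d k).mpr hk
    exact hr (pv_sound γ cc (2 * γ.length + 1) x d k (by rw [hnone]; exact hne))

-- ===== B-side lemmas =====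

theorem pv_insert_fold_get? (cc : Int) :
    ∀ (fr : List Int) (d : PySem.Dict Int Int) (k : Int),
      (fr.foldl (fun (acc : PySem.Dict Int Int) n => acc.insert n cc) d).get? k =
        if k ∈ fr then some cc else d.get? k := by
  intro fr
  induction fr with
  | nil => intro d k; simp
  | cons y fr IH =>
    intro d k
    simp only [List.foldl_cons, IH, PySem.Dict.get?_insert, List.mem_cons]
    by_cases h1 : k ∈ fr <;> by_cases h2 : k = y <;> simp [h1, h2]

theorem pv_update_len :
    ∀ (fr s : List Int), fr.Nodup → (∀ y ∈ fr, y ∉ s) →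
      (PySem.Set.update s fr).length = s.length + fr.length := by
  intro fr
  induction fr with
  | nil => intro s _ _; simp [PySem.Set.update_nil]
  | cons y fr IH =>
    intro s hnd hdisj
    rw [PySem.Set.update_cons, PySem.Set.add_of_not_mem (hdisj y (by simp))]
    rw [IH (s ++ [y]) (List.nodup_cons.mp hnd).2]
    · simp; omega
    · intro z hz
      simp only [List.mem_append, List.mem_singleton]
      rintro (h | h)
      · exact hdisj z (by simp [hz]) h
      · subst h; exact (List.nodup_cons.mp hnd).1 hz

theorem pv_inner_mem (d' : PySem.Dict Int Int) :
    ∀ (lst s : List Int) (z : Int),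
      z ∈ lst.foldl (fun (s : PySem.Set Int) nbr =>
          if d'.contains nbr then s else PySem.Set.add s nbr) s ↔
        z ∈ s ∨ (z ∈ lst ∧ d'.contains z = false) := by
  intro lst
  induction lst with
  | nil => intro s z; simp
  | cons n lst IH =>
    intro s z
    simp only [List.foldl_cons]
    by_cases hc : d'.contains n = true
    · rw [if_pos hc, IH]
      constructor
      · rintro (h | h)
        · exact Or.inl h
        · exact Or.inr ⟨by simp [h.1], h.2⟩
      · rintro (h | ⟨hm, hcz⟩)
        · exact Or.inl h
        · rcases List.mem_cons.mp hm with e | hm'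
          · subst e; rw [hc] at hcz; cases hcz
          · exact Or.inr ⟨hm', hcz⟩
    · simp only [Bool.not_eq_true] at hc
      rw [if_neg (by simp [hc]), IH]
      simp only [PySem.Set.mem_add, List.mem_cons]
      constructor
      · rintro ((h | h) | h)
        · exact Or.inl h
        · subst h; exact Or.inr ⟨Or.inl rfl, hc⟩
        · exact Or.inr ⟨Or.inr h.1, h.2⟩
      · rintro (h | ⟨(e | hm), hcz⟩)
        · exact Or.inl (Or.inl h)
        · subst e; exact Or.inl (Or.inr rfl)
        · exact Or.inr ⟨hm, hcz⟩

theorem pv_inner_nodup (d' : PySem.Dict Int Int) :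
    ∀ (lst s : List Int), s.Nodup →
      (lst.foldl (fun (s : PySem.Set Int) nbr =>
          if d'.contains nbr then s else PySem.Set.add s nbr) s).Nodup := by
  intro lst
  induction lst with
  | nil => intro s hs; exact hs
  | cons n lst IH =>
    intro s hs
    simp only [List.foldl_cons]
    by_cases hc : d'.contains n = true
    · rw [if_pos hc]; exact IH s hs
    · rw [if_neg hc]; exact IH _ (PySem.Set.nodup_add s n hs)

theorem pv_front_mem (γ : List (List Int)) (d' : PySem.Dict Int Int) (fr : List Int) (z : Int) :
    z ∈ pvFrontier γ d' fr ↔ ∃ u ∈ fr, z ∈ pvAdj γ u ∧ d'.contains z = false := by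
  unfold pvFrontier
  have hgen : ∀ (l s : List Int),
      z ∈ l.foldl (fun (s : PySem.Set Int) node =>
          ((PySem.List.pyGet? γ node).getD []).foldl
            (fun (s : PySem.Set Int) nbr => if d'.contains nbr then s else PySem.Set.add s nbr) s) s ↔
        z ∈ s ∨ ∃ u ∈ l, z ∈ pvAdj γ u ∧ d'.contains z = false := by
    intro l
    induction l with
    | nil => intro s; simp
    | cons u l IH =>
      intro s
      simp only [List.foldl_cons, IH, pv_inner_mem d']
      constructor
      · rintro (((h | h) | h))
        · exact Or.inl h
        · exact Or.inr ⟨u, by simp, by simpa [pvAdj] using h.1, h.2⟩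
        · obtain ⟨w, hw, hz⟩ := h; exact Or.inr ⟨w, by simp [hw], hz⟩
      · rintro (h | ⟨w, hw, hz⟩)
        · exact Or.inl (Or.inl h)
        · rcases List.mem_cons.mp hw with e | hw'
          · subst e; exact Or.inl (Or.inr ⟨by simpa [pvAdj] using hz.1, hz.2⟩)
          · exact Or.inr ⟨w, hw', hz⟩
  rw [hgen fr PySem.Set.empty]
  simp [PySem.Set.empty]

theorem pv_front_nodup (γ : List (List Int)) (d' : PySem.Dict Int Int) (fr : List Int) :
    (pvFrontier γ d' fr).Nodup := by
  unfold pvFrontier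
  have hgen : ∀ (l s : List Int), s.Nodup →
      (l.foldl (fun (s : PySem.Set Int) node =>
          ((PySem.List.pyGet? γ node).getD []).foldl
            (fun (s : PySem.Set Int) nbr => if d'.contains nbr then s else PySem.Set.add s nbr) s) s).Nodup := by
    intro l
    induction l with
    | nil => intro s hs; exact hs
    | cons u l IH => intro s hs; exact IH _ (pv_inner_nodup d' _ s hs)
  exact hgen fr PySem.Set.empty List.nodup_nil

theorem pv_loopB_nodup (γ : List (List Int)) (cc : Int) :
    ∀ (f : Nat) (fr : List Int) (d : PySem.Dict Int Int), d.keys.Nodup →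
      (pvLoopB γ cc f fr d).keys.Nodup := by
  intro f
  induction f with
  | zero => intro fr d h; simpa [pvLoopB] using h
  | succ f IH =>
    intro fr d h
    by_cases hfr : fr = []
    · simpa [pvLoopB, hfr] using h
    · simp only [pvLoopB, hfr, if_false]
      exact IH _ _ (PySem.Dict.nodup_keys_foldl_insert fr (fun _ _ => cc) d h)

-- characterisation of B's flood loop
theorem pv_loopB_char (γ : List (List Int)) (cc : Int)
    (HP : ∀ l ∈ γ, ∀ v ∈ l, pvInR γ.length v) :
    ∀ (f : Nat) (fr : List Int) (d : PySem.Dict Int Int),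
      d.keys.Nodup → (∀ k ∈ d.keys, pvInR γ.length k) →
      fr.Nodup → (∀ y ∈ fr, pvInR γ.length y) → (∀ y ∈ fr, y ∉ d.keys) →
      (∀ k ∈ d.keys, ∀ nb ∈ pvAdj γ k, nb ∈ d.keys ∨ nb ∈ fr) →
      pvMu γ.length d < f →
      ∀ k,
        (k ∈ d.keys → (pvLoopB γ cc f fr d).get? k = d.get? k) ∧
        (k ∉ d.keys → (∃ y ∈ fr, pvReach γ y k) → (pvLoopB γ cc f fr d).get? k = some cc) ∧
        (k ∉ d.keys → ¬ (∃ y ∈ fr, pvReach γ y k) → (pvLoopB γ cc f fr d).get? k = none) := by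
  intro f
  induction f with
  | zero => intro fr d _ _ _ _ _ _ hmu; omega
  | succ f IH =>
    intro fr d hnd hkv hfrN hfrv hfrd hsc hmu k
    by_cases hfr : fr = []
    · subst hfr
      simp only [pvLoopB]
      refine ⟨fun _ => rfl, ?_, ?_⟩
      · rintro _ ⟨y, hy, _⟩; simp at hy
      · intro hk _; exact (PySem.Dict.get?_eq_none_iff_not_mem_keys d k).mpr hk
    · have hres : pvLoopB γ cc (f + 1) fr d =
          pvLoopB γ cc f (pvFrontier γ (fr.foldl (fun (acc : PySem.Dict Int Int) n => acc.insert n cc) d) fr)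
            (fr.foldl (fun (acc : PySem.Dict Int Int) n => acc.insert n cc) d) := by
        simp [pvLoopB, hfr]
      set d' := fr.foldl (fun (acc : PySem.Dict Int Int) n => acc.insert n cc) d with hd'
      set fr' := pvFrontier γ d' fr with hfr'
      have hget' : ∀ j, d'.get? j = if j ∈ fr then some cc else d.get? j :=
        fun j => pv_insert_fold_get? cc fr d j
      have hkeys' : d'.keys = PySem.Set.update d.keys fr :=
        PySem.Dict.keys_foldl_insert fr (fun _ _ => cc) d
      have hmem' : ∀ z, z ∈ d'.keys ↔ z ∈ d.keys ∨ z ∈ fr := by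
        intro z; rw [hkeys', PySem.Set.mem_update]
      have hnd' : d'.keys.Nodup := PySem.Dict.nodup_keys_foldl_insert fr (fun _ _ => cc) d hnd
      have hkv' : ∀ j ∈ d'.keys, pvInR γ.length j := by
        intro j hj
        rcases (hmem' j).mp hj with h | h
        · exact hkv j h
        · exact hfrv j h
      have hlen' : d'.keys.length = d.keys.length + fr.length := by
        rw [hkeys', pv_update_len fr d.keys hfrN hfrd]
      have hcard : d'.keys.length ≤ 2 * γ.length := pv_card_le γ.length d'.keys hnd' hkv'
      have hfrpos : 0 < fr.length := by
        cases fr with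
        | nil => exact absurd rfl hfr
        | cons a l => simp
      have hmu' : pvMu γ.length d' < f := by unfold pvMu at *; omega
      have hcf : ∀ z, d'.contains z = false ↔ z ∉ d'.keys := by
        intro z
        constructor
        · intro h hm; rw [(PySem.Dict.contains_iff_mem_keys d' z).mpr hm] at h; cases h
        · intro hm
          cases hcz : d'.contains z
          · rfl
          · exact absurd ((PySem.Dict.contains_iff_mem_keys d' z).mp hcz) hm
      have hfm : ∀ z, z ∈ fr' ↔ ∃ u ∈ fr, z ∈ pvAdj γ u ∧ d'.contains z = false :=
        fun z => pv_front_mem γ d' fr z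
      have hfr'N : fr'.Nodup := pv_front_nodup γ d' fr
      have hfr'v : ∀ y ∈ fr', pvInR γ.length y := by
        intro y hy
        obtain ⟨u, hu, hadj, _⟩ := (hfm y).mp hy
        have hus := pv_pyGet?_some γ u (hfrv u hu)
        exact HP (pvAdj γ u) (PySem.List.mem_of_pyGet?_eq_some γ hus) y hadj
      have hfr'd : ∀ y ∈ fr', y ∉ d'.keys := by
        intro y hy
        obtain ⟨_, _, _, hcy⟩ := (hfm y).mp hy
        exact (hcf y).mp hcy
      have hsc' : ∀ j ∈ d'.keys, ∀ nb ∈ pvAdj γ j, nb ∈ d'.keys ∨ nb ∈ fr' := by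
        intro j hj nb hnb
        rcases (hmem' j).mp hj with h | h
        · rcases hsc j h nb hnb with h' | h'
          · exact Or.inl ((hmem' nb).mpr (Or.inl h'))
          · exact Or.inl ((hmem' nb).mpr (Or.inr h'))
        · by_cases hnbm : nb ∈ d'.keys
          · exact Or.inl hnbm
          · exact Or.inr ((hfm nb).mpr ⟨j, h, hnb, (hcf nb).mpr hnbm⟩)
      have IHf := IH fr' d' hnd' hkv' hfr'N hfr'v hfr'd hsc' hmu'
      rw [hres]
      refine ⟨?_, ?_, ?_⟩
      · intro hk
        have hknfr : k ∉ fr := fun h => hfrd k h hk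
        rw [(IHf k).1 ((hmem' k).mpr (Or.inl hk)), hget', if_neg hknfr]
      · intro hk hex
        by_cases hkfr : k ∈ fr
        · rw [(IHf k).1 ((hmem' k).mpr (Or.inr hkfr)), hget', if_pos hkfr]
        · have hknot : k ∉ d'.keys := fun h => by
            rcases (hmem' k).mp h with h' | h'
            · exact hk h'
            · exact hkfr h'
          obtain ⟨y, hy, hr⟩ := hex
          have hpush : ∀ (a : Int), pvReach γ a k → a ∈ d'.keys → ∃ y' ∈ fr', pvReach γ y' k := by
            intro a hra
            refine Relation.ReflTransGen.head_induction_on hra ?_ ?_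
            · intro hkm; exact absurd hkm hknot
            · intro p c hpc hck IHc hp
              by_cases hcm : c ∈ d'.keys
              · exact IHc hcm
              · rcases (hmem' p).mp hp with hpd | hpf
                · rcases hsc p hpd c hpc with h' | h'
                  · exact absurd ((hmem' c).mpr (Or.inl h')) hcm
                  · exact absurd ((hmem' c).mpr (Or.inr h')) hcm
                · exact ⟨c, (hfm c).mpr ⟨p, hpf, hpc, (hcf c).mpr hcm⟩, hck⟩
          obtain ⟨y', hy', hr'⟩ := hpush y hr ((hmem' y).mpr (Or.inr hy))
          exact (IHf k).2.1 hknot ⟨y', hy', hr'⟩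
      · intro hk hnex
        have hkfr : k ∉ fr := fun h => hnex ⟨k, h, Relation.ReflTransGen.refl⟩
        have hknot : k ∉ d'.keys := fun h => by
          rcases (hmem' k).mp h with h' | h'
          · exact hk h'
          · exact hkfr h'
        refine (IHf k).2.2 hknot ?_
        rintro ⟨y', hy', hr'⟩
        obtain ⟨u, hu, hadj, _⟩ := (hfm y').mp hy'
        exact hnex ⟨u, hu, (Relation.ReflTransGen.single hadj).trans hr'⟩

-- ===== outer loop: the two labelling passes stay pointwise equal =====

def pvINV (γ : List (List Int)) (stA stB : PySem.Dict Int Int × Int) : Prop :=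
  stA.2 = stB.2 ∧ (∀ k, stA.1.get? k = stB.1.get? k) ∧
  pvOK γ.length stA.1 ∧ pvClosedC γ stA.1 ∧ stB.1.keys.Nodup

theorem pv_outer (γ : List (List Int))
    (HP : ∀ l ∈ γ, ∀ v ∈ l, pvInR γ.length v) :
    ∀ (l : List Int) (stA stB : PySem.Dict Int Int × Int),
      (∀ y ∈ l, pvInR γ.length y) → pvINV γ stA stB →
      pvINV γ
        (l.foldl (fun (st : PySem.Dict Int Int × Int) node =>
          if st.1.contains node then st
          else (pvDfsA γ st.2 (2 * γ.length + 1) node st.1, st.2 + 1)) stA)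
        (l.foldl (fun (st : PySem.Dict Int Int × Int) start =>
          if st.1.contains start then st
          else (pvLoopB γ st.2 (2 * γ.length + 1) [start] st.1, st.2 + 1)) stB) := by
  intro l
  induction l with
  | nil => intro stA stB _ h; exact h
  | cons x l IHl =>
    intro stA stB hv hINV
    obtain ⟨hcc, hgeq, hOK, hclosed, hndB⟩ := hINV
    have hx := hv x (by simp)
    have hmemEq : ∀ z, z ∈ stA.1.keys ↔ z ∈ stB.1.keys := by
      intro z
      constructor <;> intro hm
      · by_contra hm'
        have := (PySem.Dict.get?_eq_none_iff_not_mem_keys stB.1 z).mpr hm'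
        rw [← hgeq z] at this
        exact (PySem.Dict.get?_eq_none_iff_not_mem_keys stA.1 z).mp this hm
      · by_contra hm'
        have := (PySem.Dict.get?_eq_none_iff_not_mem_keys stA.1 z).mpr hm'
        rw [hgeq z] at this
        exact (PySem.Dict.get?_eq_none_iff_not_mem_keys stB.1 z).mp this hm
    have hcoEq : stA.1.contains x = stB.1.contains x := by
      rw [PySem.Dict.contains_eq_isSome_get?, PySem.Dict.contains_eq_isSome_get?, hgeq x]
    simp only [List.foldl_cons]
    by_cases hc : stA.1.contains x = true
    · rw [if_pos hc, if_pos (hcoEq ▸ hc)]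
      exact IHl stA stB (fun y hy => hv y (by simp [hy])) ⟨hcc, hgeq, hOK, hclosed, hndB⟩
    · simp only [Bool.not_eq_true] at hc
      rw [if_neg (by simp [hc]), if_neg (by simp [hcoEq ▸ hc])]
      have hxAm : x ∉ stA.1.keys := fun m => by
        rw [(PySem.Dict.contains_iff_mem_keys stA.1 x).mpr m] at hc; cases hc
      have hxBm : x ∉ stB.1.keys := fun m => hxAm ((hmemEq x).mpr m)
      have hkvB : ∀ j ∈ stB.1.keys, pvInR γ.length j :=
        fun j hj => hOK.2 j ((hmemEq j).mpr hj)
      have hscB : ∀ j ∈ stB.1.keys, ∀ nb ∈ pvAdj γ j, nb ∈ stB.1.keys ∨ nb ∈ ([x] : List Int) := by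
        intro j hj nb hnb
        exact Or.inl ((hmemEq nb).mp (hclosed j ((hmemEq j).mpr hj) nb hnb))
      have charB := pv_loopB_char γ stB.2 HP (2 * γ.length + 1) [x] stB.1 hndB hkvB
        (by simp) (by intro y hy; simp at hy; subst hy; exact hx)
        (by intro y hy; simp at hy; subst hy; exact hxBm) hscB (by unfold pvMu; omega)
      have charA := fun k => pv_charA γ stA.2 HP x stA.1 hOK hclosed hx k
      have hgeq' : ∀ k, (pvDfsA γ stA.2 (2 * γ.length + 1) x stA.1).get? k =
          (pvLoopB γ stB.2 (2 * γ.length + 1) [x] stB.1).get? k := by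
        intro k
        by_cases hkm : k ∈ stA.1.keys
        · rw [(charA k).1 hkm, (charB k).1 ((hmemEq k).mp hkm)]
          exact hgeq k
        · have hkmB : k ∉ stB.1.keys := fun m => hkm ((hmemEq k).mpr m)
          by_cases hr : pvReach γ x k
          · rw [(charA k).2.1 hkm hr, (charB k).2.1 hkmB ⟨x, by simp, hr⟩, hcc]
          · rw [(charA k).2.2 hkm hr,
              (charB k).2.2 hkmB (by rintro ⟨y, hy, hry⟩; simp at hy; subst hy; exact hr hry)]
      have hOK' : pvOK γ.length (pvDfsA γ stA.2 (2 * γ.length + 1) x stA.1) :=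
        pv_ok_pres γ stA.2 HP _ x stA.1 hOK hx
      have hclosed' : pvClosedC γ (pvDfsA γ stA.2 (2 * γ.length + 1) x stA.1) := by
        intro j hj nb hnb
        by_cases hjm : j ∈ stA.1.keys
        · exact pv_keys_sub γ stA.2 _ x stA.1 (hclosed j hjm nb hnb)
        · have hj0 : stA.1.contains j = false := by
            cases hcj : stA.1.contains j
            · rfl
            · exact absurd ((PySem.Dict.contains_iff_mem_keys stA.1 j).mp hcj) hjm
          have := pv_newclosed γ stA.2 HP (2 * γ.length + 1) x stA.1 hOK hx
            (by unfold pvMu; omega) j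
            ((PySem.Dict.contains_iff_mem_keys _ j).mpr hj) hj0 nb hnb
          exact (PySem.Dict.contains_iff_mem_keys _ nb).mp this
      have hndB' : (pvLoopB γ stB.2 (2 * γ.length + 1) [x] stB.1).keys.Nodup :=
        pv_loopB_nodup γ stB.2 _ [x] stB.1 hndB
      exact IHl _ _ (fun y hy => hv y (by simp [hy]))
        ⟨by simp [hcc], hgeq', hOK', hclosed', hndB'⟩

-- ===== VERDICT (by name: the statement is the Claim_ definition above) =====
theorem connected_component_queries_spec : Claim_equal_connected_component_queries := by
  unfold Claim_equal_connected_component_queries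
  intro graph queries _ hPre
  unfold Spec_connected_component_queries connected_component_queries connected_component_queries_alt
  have HP : ∀ l ∈ graph, ∀ v ∈ l, pvInR graph.length v := fun l hl v hv => hPre.1 l hl v hv
  have hmem : ∀ y ∈ PySem.List.pyRange 0 graph.length 1, pvInR graph.length y := by
    intro y hy
    have h := PySem.List.mem_pyRange_one.mp hy
    exact ⟨by omega, h.2⟩
  have hINV0 : pvINV graph (PySem.Dict.empty, 0) (PySem.Dict.empty, 0) := by
    refine ⟨rfl, fun k => rfl, ⟨?_, ?_⟩, ?_, ?_⟩
    · exact PySem.Dict.nodup_keys_empty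
    · intro k hk; rw [PySem.Dict.keys_empty] at hk; simp at hk
    · intro k hk; rw [PySem.Dict.keys_empty] at hk; simp at hk
    · rw [PySem.Dict.keys_empty]; exact List.nodup_nil
  have hst := pv_outer graph HP (PySem.List.pyRange 0 graph.length 1)
    (PySem.Dict.empty, 0) (PySem.Dict.empty, 0) hmem hINV0
  obtain ⟨-, hgeq, -, -, -⟩ := hst
  rw [PySem.List.foldl_append_singleton_eq_map, List.nil_append]
  refine List.map_congr_left ?_
  intro q _
  rw [PySem.Dict.getD_eq_get?_getD, PySem.Dict.getD_eq_get?_getD,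
    PySem.Dict.getD_eq_get?_getD, PySem.Dict.getD_eq_get?_getD, hgeq q.1, hgeq q.2]
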